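-- pv_equiv track=rewrite | github.com/jovisly/AdventOfCode | 2024/day_24/part2.py | get_swapped_instructions
-- ===== SOURCE A (Python) =====
-- def get_swapped_instructions(list_instructions, swaps):
--     """Get the swapped instructions.
--
--     Swaps is a dictionary of indices to be swapped.
--     """
--     list_swapped_instructions = []
--     for ind, instruction in enumerate(list_instructions):
--         if ind in swaps:
--             swapped_ind = swaps[ind]
--             swapped_instruction = list_instructions[swapped_ind]
--             list_swapped_instructions.append([instruction[0], instruction[1], instruction[2], swapped_instruction[3]])
--         else:
--             list_swapped_instructions.append(instruction)
--
--     return list_swapped_instructions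
-- ===== SOURCE B (Python) =====
-- def get_swapped_instructions(list_instructions, swaps):
--     """Get the swapped instructions (shallow copy, then patch only swapped slots)."""
--     result = list(list_instructions)
--     for ind, swapped_ind in swaps.items():
--         if 0 <= ind < len(result):
--             row = list_instructions[ind]
--             result[ind] = [row[0], row[1], row[2], list_instructions[swapped_ind][3]]
--     return result
-- ===== Notes on version B (the rewrite author's own statement) =====
-- stated objective: idiomatic
-- what changed: B shallow-copies the list once and iterates only over the swap entries, patching the affected slots in place, instead of rebuilding the whole list while probing the dict at every index.
import Mathlib
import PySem

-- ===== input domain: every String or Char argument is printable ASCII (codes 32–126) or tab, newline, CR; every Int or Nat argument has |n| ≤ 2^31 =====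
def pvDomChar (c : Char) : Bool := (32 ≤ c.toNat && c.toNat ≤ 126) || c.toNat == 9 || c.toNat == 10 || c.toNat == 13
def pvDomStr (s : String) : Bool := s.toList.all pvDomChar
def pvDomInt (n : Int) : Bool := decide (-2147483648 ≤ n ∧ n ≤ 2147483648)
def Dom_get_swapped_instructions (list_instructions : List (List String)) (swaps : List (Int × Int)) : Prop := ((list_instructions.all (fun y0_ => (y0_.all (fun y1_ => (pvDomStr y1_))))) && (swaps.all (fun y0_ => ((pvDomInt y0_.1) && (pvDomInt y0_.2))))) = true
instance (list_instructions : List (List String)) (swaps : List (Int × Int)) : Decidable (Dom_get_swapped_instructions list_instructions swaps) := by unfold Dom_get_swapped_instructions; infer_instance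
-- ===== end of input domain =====

-- B shallow-copies the list once and patches only the slots named by the swap entries,
-- instead of rebuilding the whole list while probing the swap dict at every index (idiomatic decomposition).

-- shared helper: the patched row [row[0], row[1], row[2], list_instructions[v][3]]
def pvRow3 (list_instructions : List (List String)) (row : List String) (v : Int) : List String :=
  [PySem.List.pyGetD row 0 "", PySem.List.pyGetD row 1 "", PySem.List.pyGetD row 2 "",
   PySem.List.pyGetD (PySem.List.pyGetD list_instructions v []) 3 ""]

-- ===== PORT A =====
def get_swapped_instructions (list_instructions : List (List String)) (swaps : List (Int × Int)) : List (List String) :=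
  (PySem.List.enumerate list_instructions 0).foldl
    (fun acc p =>
      acc ++ [match swaps.find? (fun q => q.1 == p.1) with
              | some q => pvRow3 list_instructions p.2 q.2
              | none => p.2]) []

-- ===== PORT B =====
def get_swapped_instructions_alt (list_instructions : List (List String)) (swaps : List (Int × Int)) : List (List String) :=
  swaps.foldl
    (fun result p =>
      if 0 ≤ p.1 ∧ p.1 < (result.length : Int) then
        PySem.List.pySetD result p.1
          (pvRow3 list_instructions (PySem.List.pyGetD list_instructions p.1 []) p.2)
      else result) list_instructions

-- ===== PRECONDITION & SPEC =====
-- Pre_ excludes (a) swap entries on which the Python A raises IndexError (a swapped row with a key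
-- in range whose source row is shorter than 3, a swap target index out of Python's index range, or
-- a target row shorter than 4), and (b) association lists with duplicate in-range keys, on which the
-- first-match convention of a duplicate-keyed list is accidental (a Python dict never has duplicates).
def Pre_get_swapped_instructions (list_instructions : List (List String)) (swaps : List (Int × Int)) : Prop :=
  (∀ p ∈ swaps, 0 ≤ p.1 ∧ p.1 < (list_instructions.length : Int) →
      3 ≤ (list_instructions.getD p.1.toNat []).length ∧
      PySem.Raise.InRange list_instructions.length p.2 ∧
      4 ≤ (PySem.List.pyGetD list_instructions p.2 []).length) ∧
  ((swaps.map Prod.fst).filter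
      (fun k => decide (0 ≤ k) && decide (k < (list_instructions.length : Int)))).Nodup

instance (list_instructions : List (List String)) (swaps : List (Int × Int)) : Decidable (Pre_get_swapped_instructions list_instructions swaps) := by unfold Pre_get_swapped_instructions; infer_instance

def pvWitness_get_swapped_instructions : List (List String) × (List (Int × Int)) :=
  ([["a", "b", "c", "d"], ["e", "f", "g", "h"]], [(0, 1), (1, -2)])

def Spec_get_swapped_instructions (list_instructions : List (List String)) (swaps : List (Int × Int)) (out : List (List String)) : Prop := out = get_swapped_instructions_alt list_instructions swaps
instance (list_instructions : List (List String)) (swaps : List (Int × Int)) (out : List (List String)) : Decidable (Spec_get_swapped_instructions list_instructions swaps out) := by unfold Spec_get_swapped_instructions; infer_instance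

-- ===== CLAIM (what is proved, stated in full; the proofs are below) =====
def Claim_equal_get_swapped_instructions : Prop := ∀ (list_instructions : List (List String)) (swaps : List (Int × Int)), Dom_get_swapped_instructions list_instructions swaps → Pre_get_swapped_instructions list_instructions swaps → Spec_get_swapped_instructions list_instructions swaps (get_swapped_instructions list_instructions swaps)

-- ===== LEMMAS AND PROOFS =====

-- B's loop step, named for the proofs (definitionally the lambda in the port of B)
def pvBStep (list_instructions : List (List String)) (result : List (List String)) (p : Int × Int) : List (List String) :=
  if 0 ≤ p.1 ∧ p.1 < (result.length : Int) then
    PySem.List.pySetD result p.1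
      (pvRow3 list_instructions (PySem.List.pyGetD list_instructions p.1 []) p.2)
  else result

theorem pvAlt_eq_foldl (li : List (List String)) (swaps : List (Int × Int)) :
    get_swapped_instructions_alt li swaps = swaps.foldl (pvBStep li) li := rfl

theorem pvBStep_length (li acc : List (List String)) (p : Int × Int) :
    (pvBStep li acc p).length = acc.length := by
  unfold pvBStep
  split
  · exact PySem.List.length_pySetD acc p.1 _
  · rfl

theorem pvB_length (li : List (List String)) :
    ∀ (swaps : List (Int × Int)) (acc : List (List String)),
      (swaps.foldl (pvBStep li) acc).length = acc.length := by
  intro swaps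
  induction swaps with
  | nil => intro acc; rfl
  | cons p rest ih =>
      intro acc
      simp only [List.foldl_cons]
      rw [ih, pvBStep_length]

theorem pvBStep_getElem?_ne (li acc : List (List String)) (p : Int × Int) (i : Nat)
    (h : p.1 ≠ (i : Int)) : (pvBStep li acc p)[i]? = acc[i]? := by
  unfold pvBStep
  split
  · rename_i hc
    rw [PySem.List.pySetD_of_nonneg (h := hc.1)]
    apply List.getElem?_set_ne
    intro he
    apply h
    omega
  · rfl

theorem pvB_none (li : List (List String)) :
    ∀ (swaps : List (Int × Int)) (acc : List (List String)) (i : Nat),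
      (i : Int) ∉ swaps.map Prod.fst →
      (swaps.foldl (pvBStep li) acc)[i]? = acc[i]? := by
  intro swaps
  induction swaps with
  | nil => intro acc i _; rfl
  | cons p rest ih =>
      intro acc i hmem
      simp only [List.map_cons, List.mem_cons, not_or] at hmem
      simp only [List.foldl_cons]
      rw [ih _ _ (by simpa using hmem.2), pvBStep_getElem?_ne]
      intro h; exact hmem.1 h.symm

theorem pvB_char (li : List (List String)) :
    ∀ (swaps : List (Int × Int)) (acc : List (List String)) (i : Nat),
      i < acc.length →
      (swaps.map Prod.fst).count (i : Int) ≤ 1 →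
      (swaps.foldl (pvBStep li) acc)[i]? =
        match swaps.find? (fun q => q.1 == (i : Int)) with
        | some q => some (pvRow3 li (PySem.List.pyGetD li q.1 []) q.2)
        | none => acc[i]? := by
  intro swaps
  induction swaps with
  | nil => intro acc i _ _; rfl
  | cons p rest ih =>
      intro acc i hi hcount
      simp only [List.foldl_cons]
      by_cases h : p.1 = (i : Int)
      · have hfind : (p :: rest).find? (fun q => q.1 == (i : Int)) = some p := by
          simp [h]
        rw [hfind]
        have hrest : (i : Int) ∉ rest.map Prod.fst := by
          intro hmem
          have h1 : 1 ≤ (rest.map Prod.fst).count (i : Int) := List.one_le_count_iff.mpr hmem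
          have h2 : ((p :: rest).map Prod.fst).count (i : Int)
              = (rest.map Prod.fst).count (i : Int) + 1 := by
            simp [List.map_cons, h]
          omega
        rw [pvB_none li rest _ i hrest]
        unfold pvBStep
        have hc : 0 ≤ p.1 ∧ p.1 < (acc.length : Int) := by
          constructor <;> omega
        rw [if_pos hc, PySem.List.pySetD_of_nonneg (h := hc.1)]
        have ht : p.1.toNat = i := by omega
        rw [ht]
        exact List.getElem?_set_self (by exact hi)
      · have hfind : (p :: rest).find? (fun q => q.1 == (i : Int))
            = rest.find? (fun q => q.1 == (i : Int)) := by
          simp [h]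
        rw [hfind]
        have hcount' : (rest.map Prod.fst).count (i : Int) ≤ 1 := by
          have : ((p :: rest).map Prod.fst).count (i : Int)
              = (rest.map Prod.fst).count (i : Int) + if p.1 = (i : Int) then 1 else 0 := by
            simp [List.map_cons, List.count_cons]
          omega
        have hlen : i < (pvBStep li acc p).length := by rw [pvBStep_length]; exact hi
        rw [ih (pvBStep li acc p) i hlen hcount']
        rw [pvBStep_getElem?_ne li acc p i h]

theorem pvA_eq_map (li : List (List String)) (swaps : List (Int × Int)) :
    get_swapped_instructions li swaps =
      (PySem.List.enumerate li 0).map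
        (fun p => match swaps.find? (fun q => q.1 == p.1) with
                  | some q => pvRow3 li p.2 q.2
                  | none => p.2) := by
  unfold get_swapped_instructions
  rw [PySem.List.foldl_append_singleton_eq_map]
  rfl

-- ===== VERDICT (by name: the statement is the Claim_ definition above) =====
theorem get_swapped_instructions_spec : Claim_equal_get_swapped_instructions := by
  intro li swaps _ hpre
  unfold Spec_get_swapped_instructions
  symm
  rw [pvA_eq_map, pvAlt_eq_foldl]
  apply List.ext_getElem?
  intro i
  by_cases hi : i < li.length
  · have hcount : (swaps.map Prod.fst).count (i : Int) ≤ 1 := by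
      have hfilter : ((swaps.map Prod.fst).filter
          (fun k => decide (0 ≤ k) && decide (k < (li.length : Int)))).count (i : Int)
          = (swaps.map Prod.fst).count (i : Int) := by
        apply List.count_filter
        simp
        omega
      have := List.nodup_iff_count_le_one.mp hpre.2 (i : Int)
      omega
    rw [pvB_char li swaps li i hi hcount]
    rw [List.getElem?_map, PySem.List.getElem?_enumerate]
    rw [List.getElem?_eq_getElem hi]
    simp only [Option.map_some, zero_add]
    cases hq : swaps.find? (fun q => q.1 == (i : Int)) with
    | none => simp
    | some q =>
        have hqi : q.1 = (i : Int) := by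
          have := List.find?_some hq
          simpa using this
        have hgd : PySem.List.pyGetD li q.1 [] = li[i] := by
          rw [hqi, PySem.List.pyGetD_natCast, List.getD_eq_getElem?_getD,
            List.getElem?_eq_getElem hi]
          rfl
        simp [hgd]
  · rw [List.getElem?_eq_none (by rw [pvB_length]; omega),
        List.getElem?_eq_none (by rw [List.length_map, PySem.List.length_enumerate]; omega)]
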